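-- pv_equiv track=rewrite | github.com/pypi-data/pypi-mirror-313 | packages/FreeTrace/freetrace-1.1.2.tar.gz/freetrace-1.1.2/ANDI2_PRESET/ANDI_Tracking.py | unpack_distribution
-- ===== SOURCE A (Python) =====
-- def unpack_distribution(distrib, paused_times):
--     thresholds = []
--     pdfs = []
--     bins = []
--     for paused_time in paused_times:
--         thresholds.append(distrib[paused_time][0])
--         pdfs.append(distrib[paused_time][1])
--         bins.append(distrib[paused_time][2])
--     return thresholds, pdfs, bins
-- ===== SOURCE B (Python) =====
-- def unpack_distribution(distrib, paused_times):
--     # Recursive decomposition: peel off the first paused_time, recurse on the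
--     # rest, and cons the current row's three fields onto the recursive result.
--     def go(ts):
--         if not ts:
--             return [], [], []
--         row = distrib[ts[0]]
--         th, pd, bn = go(ts[1:])
--         return [row[0]] + th, [row[1]] + pd, [row[2]] + bn
--     return go(paused_times)
-- ===== Notes on version B (the rewrite author's own statement) =====
-- stated objective: alternative
-- what changed: Replaces the imperative loop with three append-accumulators by a structural recursion on paused_times that builds the three result lists front-to-back by consing onto the recursive result.
import Mathlib
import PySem

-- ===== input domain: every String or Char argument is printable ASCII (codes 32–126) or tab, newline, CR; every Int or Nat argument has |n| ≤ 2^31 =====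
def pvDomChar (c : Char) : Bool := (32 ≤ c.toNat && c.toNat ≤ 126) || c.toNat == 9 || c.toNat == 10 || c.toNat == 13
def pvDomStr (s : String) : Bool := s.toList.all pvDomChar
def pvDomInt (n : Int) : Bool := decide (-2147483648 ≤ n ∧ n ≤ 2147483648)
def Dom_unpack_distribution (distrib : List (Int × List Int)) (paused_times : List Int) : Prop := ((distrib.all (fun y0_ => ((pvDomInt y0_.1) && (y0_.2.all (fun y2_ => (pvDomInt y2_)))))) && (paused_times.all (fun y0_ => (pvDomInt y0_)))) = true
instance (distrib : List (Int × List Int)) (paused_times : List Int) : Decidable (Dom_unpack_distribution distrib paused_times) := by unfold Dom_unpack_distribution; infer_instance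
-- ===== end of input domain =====

-- B replaces A's imperative loop with three append-accumulators by a structural
-- recursion that conses each row's fields onto the recursive result (objective: alternative).


-- ===== PORT A =====
-- A: one loop over paused_times, appending the row's fields 0/1/2 to three accumulators.
-- Under Pre_ the getD defaults are never used (the key exists and the row has ≥ 3 entries).
def unpack_distribution (distrib : List (Int × List Int)) (paused_times : List Int) : List Int × List Int × List Int :=
  paused_times.foldl
    (fun acc t =>
      let row := ((PySem.Dict.mk distrib).get? t).getD []
      (acc.1 ++ [(PySem.List.pyGet? row 0).getD 0],
       acc.2.1 ++ [(PySem.List.pyGet? row 1).getD 0],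
       acc.2.2 ++ [(PySem.List.pyGet? row 2).getD 0]))
    ([], [], [])

-- ===== PORT B =====
-- B's inner 'go': structural recursion on the list of times, consing onto the recursive result.
def unpack_go (distrib : List (Int × List Int)) : List Int → List Int × List Int × List Int
  | [] => ([], [], [])
  | t :: ts =>
    let row := ((PySem.Dict.mk distrib).get? t).getD []
    match unpack_go distrib ts with
    | (th, pd, bn) =>
      ((PySem.List.pyGet? row 0).getD 0 :: th,
       (PySem.List.pyGet? row 1).getD 0 :: pd,
       (PySem.List.pyGet? row 2).getD 0 :: bn)

def unpack_distribution_alt (distrib : List (Int × List Int)) (paused_times : List Int) : List Int × List Int × List Int :=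
  unpack_go distrib paused_times

-- ===== PRECONDITION & SPEC =====
-- Pre_: A raises KeyError when a paused_time is not a key of distrib and IndexError when the
-- selected row has fewer than 3 entries; exactly those inputs are excluded.
def Pre_unpack_distribution (distrib : List (Int × List Int)) (paused_times : List Int) : Prop :=
  ∀ t ∈ paused_times, ∃ r ∈ distrib, r.1 = t ∧ 3 ≤ r.2.length
instance (distrib : List (Int × List Int)) (paused_times : List Int) : Decidable (Pre_unpack_distribution distrib paused_times) := by unfold Pre_unpack_distribution; infer_instance
def pvWitness_unpack_distribution : (List (Int × List Int)) × List Int := ([(1, [7, 8, 9]), (2, [4, 5, 6, 7])], [2, 1, 2])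

def Spec_unpack_distribution (distrib : List (Int × List Int)) (paused_times : List Int) (out : List Int × List Int × List Int) : Prop := out = unpack_distribution_alt distrib paused_times
instance (distrib : List (Int × List Int)) (paused_times : List Int) (out : List Int × List Int × List Int) : Decidable (Spec_unpack_distribution distrib paused_times out) := by unfold Spec_unpack_distribution; infer_instance

-- ===== CLAIM (what is proved, stated in full; the proofs are below) =====
def Claim_equal_unpack_distribution : Prop := ∀ (distrib : List (Int × List Int)) (paused_times : List Int), Dom_unpack_distribution distrib paused_times → Pre_unpack_distribution distrib paused_times → Spec_unpack_distribution distrib paused_times (unpack_distribution distrib paused_times)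

-- ===== LEMMAS AND PROOFS =====
-- A's append-accumulating fold, started at (a, b, c), prepends (a, b, c) to B's cons recursion.
theorem unpack_fold_eq (distrib : List (Int × List Int)) (ts : List Int)
    (a b c : List Int) :
    ts.foldl
      (fun acc t =>
        let row := ((PySem.Dict.mk distrib).get? t).getD []
        (acc.1 ++ [(PySem.List.pyGet? row 0).getD 0],
         acc.2.1 ++ [(PySem.List.pyGet? row 1).getD 0],
         acc.2.2 ++ [(PySem.List.pyGet? row 2).getD 0]))
      (a, b, c)
    = (a ++ (unpack_go distrib ts).1,
       b ++ (unpack_go distrib ts).2.1,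
       c ++ (unpack_go distrib ts).2.2) := by
  induction ts generalizing a b c with
  | nil => simp [unpack_go]
  | cons t ts ih => simp [List.foldl_cons, unpack_go, ih]

-- ===== VERDICT (by name: the statement is the Claim_ definition above) =====
theorem unpack_distribution_spec : Claim_equal_unpack_distribution := by
  intro distrib paused_times _ _
  unfold Spec_unpack_distribution unpack_distribution unpack_distribution_alt
  rw [unpack_fold_eq]
  simp
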